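-- pv_equiv track=rewrite | github.com/manwar/perlweeklychallenge-club | challenge-277/pokgopun/python/ch-2.py | strongPair
-- ===== SOURCE A (Python) =====
-- def strongPair(ints):
--     ints = tuple(set(ints))
--     c = 0
--     l = len(ints)
--     for i in range(l-1):
--         for j in range(i+1,l):
--             x, y = ints[i], ints[j]
--             if x == y:
--                 continue
--             if max(x,y) < 2*min(x,y):
--                 c += 1
--     return c
-- ===== SOURCE B (Python) =====
-- def strongPair(ints):
--     vals = sorted(set(ints))
--     n = len(vals)
--     total = 0
--     for i in range(n):
--         t = 2 * vals[i]
--         lo, hi = i + 1, n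
--         while lo < hi:
--             mid = (lo + hi) // 2
--             if vals[mid] < t:
--                 lo = mid + 1
--             else:
--                 hi = mid
--         total += lo - (i + 1)
--     return total
-- ===== Notes on version B (the rewrite author's own statement) =====
-- stated objective: faster
-- what changed: Replaces A's quadratic scan over all index pairs of the deduplicated tuple by sorting the distinct values and counting, for each value, the partners above it with a binary search (larger < 2*smaller suffices on a sorted list).
import Mathlib
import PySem

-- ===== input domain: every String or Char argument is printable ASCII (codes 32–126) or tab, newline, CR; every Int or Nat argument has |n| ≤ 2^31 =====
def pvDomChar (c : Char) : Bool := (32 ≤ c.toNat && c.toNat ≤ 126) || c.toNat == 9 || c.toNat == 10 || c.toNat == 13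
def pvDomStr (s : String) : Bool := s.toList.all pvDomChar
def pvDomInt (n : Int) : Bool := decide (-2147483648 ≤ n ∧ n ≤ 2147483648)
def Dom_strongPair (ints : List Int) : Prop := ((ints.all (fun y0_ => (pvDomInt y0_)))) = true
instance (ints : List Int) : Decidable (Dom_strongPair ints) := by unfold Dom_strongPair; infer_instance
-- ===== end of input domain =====

-- B sorts the distinct values and counts partners with a binary search instead of A's double loop
-- over all index pairs; the pair count does not depend on set-iteration order.

-- ===== PORT A =====
def strongPair (ints : List Int) : Int :=
  let d := PySem.Set.ofList ints            -- ints = tuple(set(ints))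
  let l := d.length
  (List.range (l - 1)).foldl (fun (c : Int) (i : Nat) =>    -- for i in range(l-1)
    (List.range' (i + 1) (l - (i + 1))).foldl (fun (c : Int) (j : Nat) =>   -- for j in range(i+1, l)
      let x := PySem.List.pyGetD d (i : Int) 0  -- ints[i]; 0 ≤ i < l, always in range
      let y := PySem.List.pyGetD d (j : Int) 0  -- ints[j]; 0 ≤ j < l, always in range
      if x = y then c
      else if max x y < 2 * min x y then c + 1 else c) c) 0

-- ===== PORT B =====
-- the while-loop binary search of Source B: recursion on hi - lo
def pvBsearch (vals : List Int) (t : Int) (lo hi : Nat) : Nat :=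
  if h : lo < hi then
    let mid := (lo + hi) / 2
    if PySem.List.pyGetD vals (mid : Int) 0 < t then pvBsearch vals t (mid + 1) hi
    else pvBsearch vals t lo mid
  else lo
termination_by hi - lo
decreasing_by all_goals omega

def strongPair_alt (ints : List Int) : Int :=
  let vals := PySem.List.sorted (PySem.Set.ofList ints) (fun x => x) false  -- sorted(set(ints))
  let n := vals.length
  (List.range n).foldl (fun (total : Int) (i : Nat) =>      -- for i in range(n)
    let t := 2 * PySem.List.pyGetD vals (i : Int) 0
    let lo := pvBsearch vals t (i + 1) n
    total + ((lo : Int) - ((i : Int) + 1))) 0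

-- ===== PRECONDITION & SPEC =====
def Spec_strongPair (ints : List Int) (out : Int) : Prop := out = strongPair_alt ints
instance (ints : List Int) (out : Int) : Decidable (Spec_strongPair ints out) := by unfold Spec_strongPair; infer_instance

-- ===== CLAIM (what is proved, stated in full; the proofs are below) =====
def Claim_equal_strongPair : Prop := ∀ (ints : List Int), Dom_strongPair ints → Spec_strongPair ints (strongPair ints)

-- ===== LEMMAS AND PROOFS =====

-- the strong-pair test of A's inner body, as a symmetric boolean predicate
def pvStrongb (x y : Int) : Bool := decide (x ≠ y) && decide (max x y < 2 * min x y)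

theorem pvStrongb_comm (x y : Int) : pvStrongb x y = pvStrongb y x := by
  simp [pvStrongb, max_comm, min_comm, ne_comm]

-- the canonical pair count: sum over each element of its strong partners later in the list
def pvPc : List Int → Int
  | [] => 0
  | a :: t => (t.countP (pvStrongb a) : Int) + pvPc t

theorem pvPc_perm {L L' : List Int} (h : L.Perm L') : pvPc L = pvPc L' := by
  induction h with
  | nil => rfl
  | cons a h ih => simp [pvPc, ih, h.countP_eq]
  | swap a b t => simp only [pvPc, List.countP_cons, pvStrongb_comm a b]; push_cast; ring
  | trans _ _ ih1 ih2 => exact ih1.trans ih2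

theorem pvPc_of_short (L : List Int) (h : L.length ≤ 1) : pvPc L = 0 := by
  match L, h with
  | [], _ => rfl
  | [a], _ => simp [pvPc]

-- A's inner loop counts the strong partners of x among d.drop k
theorem pvA_inner (d : List Int) (x : Int) :
    ∀ n k c, n = d.length - k →
    ((List.range' k n).foldl (fun (c : Int) (j : Nat) =>
      if x = PySem.List.pyGetD d (j : Int) 0 then c
      else if max x (PySem.List.pyGetD d (j : Int) 0) < 2 * min x (PySem.List.pyGetD d (j : Int) 0)
        then c + 1 else c) c)
      = c + ((d.drop k).countP (pvStrongb x) : Int) := by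
  intro n
  induction n with
  | zero =>
    intro k c h
    rw [List.drop_eq_nil_of_le (by omega)]
    simp
  | succ m ih =>
    intro k c h
    have hk : k < d.length := by omega
    have hy : PySem.List.pyGetD d (k : Int) 0 = d[k] := by
      simp [PySem.List.pyGetD_natCast, List.getElem?_eq_getElem hk]
    rw [List.range'_succ, List.foldl_cons, ih (k + 1) _ (by omega),
        List.drop_eq_getElem_cons hk, List.countP_cons, hy]
    by_cases h1 : x = d[k]
    · simp [pvStrongb, h1]
    · by_cases h2 : max x d[k] < 2 * min x d[k]
      · simp only [pvStrongb, h1, h2, decide_true,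
          ne_eq, not_false_eq_true, Bool.and_self, if_true]
        push_cast; ring
      · simp [pvStrongb, h1, h2]

-- A's outer loop, started at index k, adds pvPc of d.drop k
theorem pvA_outer (d : List Int) :
    ∀ n k c, n = d.length - 1 - k →
    ((List.range' k n).foldl (fun (c : Int) (i : Nat) =>
      (List.range' (i + 1) (d.length - (i + 1))).foldl (fun (c : Int) (j : Nat) =>
        if PySem.List.pyGetD d (i : Int) 0 = PySem.List.pyGetD d (j : Int) 0 then c
        else if max (PySem.List.pyGetD d (i : Int) 0) (PySem.List.pyGetD d (j : Int) 0)
              < 2 * min (PySem.List.pyGetD d (i : Int) 0) (PySem.List.pyGetD d (j : Int) 0)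
          then c + 1 else c) c) c)
      = c + pvPc (d.drop k) := by
  intro n
  induction n with
  | zero =>
    intro k c h
    have hshort : (d.drop k).length ≤ 1 := by
      rw [List.length_drop]; omega
    simp [pvPc_of_short _ hshort]
  | succ m ih =>
    intro k c h
    have hk : k < d.length := by omega
    rw [List.range'_succ, List.foldl_cons,
        pvA_inner d (PySem.List.pyGetD d (k : Int) 0) (d.length - (k + 1)) (k + 1) c rfl,
        ih (k + 1) _ (by omega), List.drop_eq_getElem_cons hk]
    have hy : PySem.List.pyGetD d (k : Int) 0 = d[k] := by
      simp [PySem.List.pyGetD_natCast, List.getElem?_eq_getElem hk]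
    rw [hy]
    show c + _ + _ = c + pvPc (d[k] :: d.drop (k + 1))
    simp only [pvPc]
    ring

theorem pvA_eq_pc (ints : List Int) : strongPair ints = pvPc (PySem.Set.ofList ints) := by
  simp only [strongPair, List.range_eq_range']
  rw [pvA_outer (PySem.Set.ofList ints) ((PySem.Set.ofList ints).length - 1) 0 0 (by omega)]
  simp

-- evaluating the list at an in-range Nat index
theorem pvGetD_eq (L : List Int) (k : Nat) (hk : k < L.length) :
    PySem.List.pyGetD L (k : Int) 0 = L[k] := by
  simp [PySem.List.pyGetD_natCast, List.getElem?_eq_getElem hk]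

-- binary search returns lo + the number of indices j in [lo, hi) with vals[j] < t, on a ≤-sorted list
theorem pvBsearch_count (vals : List Int)
    (hs : ∀ i j : Nat, (hij : i < j) → (hj : j < vals.length) → vals[i]'(by omega) ≤ vals[j]) (t : Int) :
    ∀ n lo hi, hi - lo ≤ n → lo ≤ hi → hi ≤ vals.length →
      pvBsearch vals t lo hi
        = lo + (List.range' lo (hi - lo)).countP (fun j => decide (vals.getD j 0 < t)) := by
  intro n
  induction n with
  | zero =>
    intro lo hi h1 h2 h3
    have he : hi = lo := by omega
    subst he
    rw [pvBsearch]
    simp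
  | succ m ih =>
    intro lo hi h1 h2 h3
    rw [pvBsearch]
    by_cases hlt : lo < hi
    · rw [dif_pos hlt]
      have hmid1 : lo ≤ (lo + hi) / 2 := by omega
      have hmid2 : (lo + hi) / 2 < hi := by omega
      have hmlen : (lo + hi) / 2 < vals.length := by omega
      show (if PySem.List.pyGetD vals (((lo + hi) / 2 : Nat) : Int) 0 < t
             then pvBsearch vals t ((lo + hi) / 2 + 1) hi
             else pvBsearch vals t lo ((lo + hi) / 2)) = _
      rw [pvGetD_eq vals _ hmlen]
      by_cases hv : vals[(lo + hi) / 2] < t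
      · rw [if_pos hv, ih ((lo + hi) / 2 + 1) hi (by omega) (by omega) h3]
        have e1 : (lo + hi) / 2 + 1 - lo + (hi - ((lo + hi) / 2 + 1)) = hi - lo := by omega
        have e2 : lo + 1 * ((lo + hi) / 2 + 1 - lo) = (lo + hi) / 2 + 1 := by omega
        rw [← e1, ← List.range'_append, e2, List.countP_append]
        have hall : (List.range' lo ((lo + hi) / 2 + 1 - lo)).countP
            (fun j => decide (vals.getD j 0 < t)) = (List.range' lo ((lo + hi) / 2 + 1 - lo)).length := by
          apply List.countP_eq_length.2
          intro j hj
          rw [List.mem_range'_1] at hj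
          have hjlen : j < vals.length := by omega
          rw [List.getD_eq_getElem _ _ hjlen, decide_eq_true_iff]
          rcases Nat.lt_or_ge j ((lo + hi) / 2) with hj2 | hj2
          · exact lt_of_le_of_lt (hs j _ hj2 hmlen) hv
          · have : j = (lo + hi) / 2 := by omega
            subst this; exact hv
        rw [hall, List.length_range']
        omega
      · rw [if_neg hv, ih lo ((lo + hi) / 2) (by omega) (by omega) (by omega)]
        have e1 : (lo + hi) / 2 - lo + (hi - (lo + hi) / 2) = hi - lo := by omega
        have e2 : lo + 1 * ((lo + hi) / 2 - lo) = (lo + hi) / 2 := by omega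
        rw [← e1, ← List.range'_append, e2, List.countP_append]
        have hzero : (List.range' ((lo + hi) / 2) (hi - (lo + hi) / 2)).countP
            (fun j => decide (vals.getD j 0 < t)) = 0 := by
          apply List.countP_eq_zero.2
          intro j hj
          rw [List.mem_range'_1] at hj
          have hjlen : j < vals.length := by omega
          rw [List.getD_eq_getElem _ _ hjlen]
          simp only [decide_eq_true_iff, not_lt]
          rcases Nat.lt_or_ge ((lo + hi) / 2) j with hj2 | hj2
          · exact le_trans (not_lt.1 hv) (hs _ j hj2 hjlen)
          · have : j = (lo + hi) / 2 := by omega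
            subst this; exact not_lt.1 hv
        rw [hzero]
        omega
    · rw [dif_neg hlt]
      have he : hi = lo := by omega
      subst he
      simp

-- the index range [k, L.length) reads off L.drop k
theorem pvMap_getD_range' (L : List Int) :
    ∀ n k, n = L.length - k → (List.range' k n).map (fun j => L.getD j 0) = L.drop k := by
  intro n
  induction n with
  | zero =>
    intro k h
    rw [List.drop_eq_nil_of_le (by omega)]
    simp
  | succ m ih =>
    intro k h
    have hk : k < L.length := by omega
    rw [List.range'_succ, List.map_cons, ih (k + 1) (by omega),
        List.getD_eq_getElem _ _ hk, List.drop_eq_getElem_cons hk]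

-- B's loop, started at index k, adds pvPc of vals.drop k (vals strictly sorted)
theorem pvB_outer (vals : List Int) (hp : vals.Pairwise (· < ·)) :
    ∀ n k c, n = vals.length - k →
    ((List.range' k n).foldl (fun (total : Int) (i : Nat) =>
        total + (((pvBsearch vals (2 * PySem.List.pyGetD vals (i : Int) 0) (i + 1) vals.length : Nat) : Int)
          - ((i : Int) + 1))) c)
      = c + pvPc (vals.drop k) := by
  have hlt : ∀ i j : Nat, (hi : i < vals.length) → (hj : j < vals.length) → i < j → vals[i] < vals[j] :=
    List.pairwise_iff_getElem.mp hp
  have hs : ∀ i j : Nat, (hij : i < j) → (hj : j < vals.length) → vals[i]'(by omega) ≤ vals[j] :=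
    fun i j hij hj => le_of_lt (hlt i j (by omega) hj hij)
  intro n
  induction n with
  | zero =>
    intro k c h
    rw [List.drop_eq_nil_of_le (by omega)]
    simp [pvPc]
  | succ m ih =>
    intro k c h
    have hk : k < vals.length := by omega
    rw [List.range'_succ, List.foldl_cons, pvGetD_eq vals k hk,
        pvBsearch_count vals hs (2 * vals[k]) (vals.length - (k + 1)) (k + 1) vals.length
          (by omega) (by omega) (le_refl _),
        ih (k + 1) _ (by omega), List.drop_eq_getElem_cons hk]
    have hcnt : (List.range' (k + 1) (vals.length - (k + 1))).countP
        (fun j => decide (vals.getD j 0 < 2 * vals[k]))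
        = (vals.drop (k + 1)).countP (pvStrongb vals[k]) := by
      rw [← pvMap_getD_range' vals (vals.length - (k + 1)) (k + 1) rfl, List.countP_map]
      apply List.countP_congr
      intro j hj
      rw [List.mem_range'_1] at hj
      have hjlen : j < vals.length := by omega
      have hky : vals[k] < vals[j] := hlt k j hk hjlen (by omega)
      simp only [Function.comp, pvStrongb, Bool.and_eq_true, decide_eq_true_iff,
        List.getD_eq_getElem _ _ hjlen]
      constructor
      · intro hlt2
        exact ⟨ne_of_lt hky, by rw [max_eq_right (le_of_lt hky), min_eq_left (le_of_lt hky)]; exact hlt2⟩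
      · rintro ⟨_, hm⟩
        rw [max_eq_right (le_of_lt hky), min_eq_left (le_of_lt hky)] at hm
        exact hm
    rw [hcnt]
    show c + _ + _ = c + pvPc (vals[k] :: vals.drop (k + 1))
    simp only [pvPc]
    push_cast
    ring

theorem pvB_eq_pc (ints : List Int) :
    strongPair_alt ints = pvPc (PySem.List.sorted (PySem.Set.ofList ints) (fun x => x) false) := by
  have hp : (PySem.List.sorted (PySem.Set.ofList ints) (fun x => x) false).Pairwise (· < ·) :=
    PySem.List.sorted_ofList_pairwise_lt ints
  simp only [strongPair_alt, List.range_eq_range']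
  rw [pvB_outer _ hp _ 0 0 (by omega)]
  simp

-- ===== VERDICT (by name: the statement is the Claim_ definition above) =====
theorem strongPair_spec : Claim_equal_strongPair := by
  intro ints _
  unfold Spec_strongPair
  rw [pvA_eq_pc, pvB_eq_pc]
  exact pvPc_perm (PySem.List.sorted_perm _ _ _).symm
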